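-- pv_equiv track=rewrite | github.com/nerdneilsfield/ai-deepresearch-flow | python/deepresearch_flow/paper/web/app.py | _extract_html_table_placeholders
-- ===== SOURCE A (Python) =====
-- def _extract_html_table_placeholders(text: str) -> tuple[str, dict[str, str]]:
--     placeholders: dict[str, str] = {}
--     out: list[str] = []
--     idx = 0
--     in_fence = False
--     fence_char = ""
--     fence_len = 0
--     inline_delim_len = 0
--
--     def next_placeholder(value: str) -> str:
--         key = f"@@HTML_TABLE_{len(placeholders)}@@"
--         placeholders[key] = value
--         return key
--
--     lower = text.lower()
--     while idx < len(text):
--         at_line_start = idx == 0 or text[idx - 1] == "\n"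
--
--         if inline_delim_len == 0 and at_line_start:
--             line_end = text.find("\n", idx)
--             if line_end == -1:
--                 line_end = len(text)
--             line = text[idx:line_end]
--             stripped = line.lstrip(" ")
--             leading_spaces = len(line) - len(stripped)
--             if leading_spaces <= 3 and stripped:
--                 first = stripped[0]
--                 if first in {"`", "~"}:
--                     run_len = 0
--                     while run_len < len(stripped) and stripped[run_len] == first:
--                         run_len += 1
--                     if run_len >= 3:
--                         if not in_fence:
--                             in_fence = True
--                             fence_char = first
--                             fence_len = run_len
--                         elif first == fence_char and run_len >= fence_len:
--                             in_fence = False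
--                             fence_char = ""
--                             fence_len = 0
--                         out.append(line)
--                         idx = line_end
--                         continue
--
--         if in_fence:
--             out.append(text[idx])
--             idx += 1
--             continue
--
--         if inline_delim_len > 0:
--             delim = "`" * inline_delim_len
--             if text.startswith(delim, idx):
--                 out.append(delim)
--                 idx += inline_delim_len
--                 inline_delim_len = 0
--                 continue
--             out.append(text[idx])
--             idx += 1
--             continue
--
--         if text[idx] == "`":
--             run_len = 0
--             while idx + run_len < len(text) and text[idx + run_len] == "`":
--                 run_len += 1
--             inline_delim_len = run_len
--             out.append("`" * run_len)
--             idx += run_len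
--             continue
--
--         if lower.startswith("<table", idx):
--             end = lower.find("</table>", idx)
--             if end != -1:
--                 end += len("</table>")
--                 raw = text[idx:end]
--                 key = next_placeholder(raw)
--                 if out and not out[-1].endswith("\n"):
--                     out.append("\n\n")
--                 out.append(key)
--                 out.append("\n\n")
--                 idx = end
--                 continue
--
--         out.append(text[idx])
--         idx += 1
--
--     return "".join(out), placeholders
-- ===== SOURCE B (Python) =====
-- def _run_len(s: str, start: int, ch: str) -> int:
--     r = start
--     while r < len(s) and s[r] == ch:
--         r += 1
--     return r - start
--
--
-- def _fence_block(text: str, ch: str, length: int, i: int) -> tuple[str, int]: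
--     # i is at the newline ending the opening marker line (or == len(text));
--     # returns (the block text, copied verbatim, and the index just past the
--     # closing marker line, or the end of the text if the fence never closes).
--     n = len(text)
--     start = i
--     if i < n:
--         i += 1
--     while i < n:
--         j = text.find("\n", i)
--         if j == -1:
--             j = n
--         line = text[i:j]
--         core = line.lstrip(" ")
--         if core and len(line) - len(core) <= 3 and core[0] == ch and _run_len(core, 0, ch) >= length:
--             return text[start:j], j
--         i = j + 1 if j < n else n
--     return text[start:i], i
--
--
-- def _extract_html_table_placeholders(text: str) -> tuple[str, dict[str, str]]:
--     # Different decomposition: the main loop has no fence/span state variables.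
--     # A fenced block is consumed whole by the line-oriented helper _fence_block,
--     # and an inline code span is skipped in one str.find of its closing delimiter,
--     # so the main loop only ever runs in "normal" mode.
--     placeholders: dict[str, str] = {}
--     lower = text.lower()
--     n = len(text)
--     res = ""
--     i = 0
--     while i < n:
--         if i == 0 or text[i - 1] == "\n":
--             j = text.find("\n", i)
--             if j == -1:
--                 j = n
--             line = text[i:j]
--             core = line.lstrip(" ")
--             if core and len(line) - len(core) <= 3 and core[0] in "`~" and _run_len(core, 0, core[0]) >= 3:
--                 chunk, i = _fence_block(text, core[0], _run_len(core, 0, core[0]), j)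
--                 res += line + chunk
--                 continue
--         c = text[i]
--         if c == "`":
--             k = _run_len(text, i, "`")
--             j = text.find("`" * k, i + k)
--             if j == -1:
--                 res += text[i:]
--                 i = n
--             else:
--                 res += text[i:j + k]
--                 i = j + k
--             continue
--         if lower.startswith("<table", i):
--             end = lower.find("</table>", i)
--             if end != -1:
--                 end += 8
--                 key = f"@@HTML_TABLE_{len(placeholders)}@@"
--                 placeholders[key] = text[i:end]
--                 if res and not res.endswith("\n"):
--                     res += "\n\n"
--                 res += key + "\n\n"
--                 i = end
--                 continue
--         res += c
--         i += 1
--     return res, placeholders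
-- ===== Notes on version B (the rewrite author's own statement) =====
-- stated objective: alternative
-- what changed: B eliminates A's fence/span state variables and fragment list: a line-oriented helper consumes a whole fenced block at a time, an inline code span is skipped with one str.find of its closing backtick delimiter, and the output string is built directly with a tail check for the newline-padding rule, so B's main loop only ever runs in normal mode.
import Mathlib
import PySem

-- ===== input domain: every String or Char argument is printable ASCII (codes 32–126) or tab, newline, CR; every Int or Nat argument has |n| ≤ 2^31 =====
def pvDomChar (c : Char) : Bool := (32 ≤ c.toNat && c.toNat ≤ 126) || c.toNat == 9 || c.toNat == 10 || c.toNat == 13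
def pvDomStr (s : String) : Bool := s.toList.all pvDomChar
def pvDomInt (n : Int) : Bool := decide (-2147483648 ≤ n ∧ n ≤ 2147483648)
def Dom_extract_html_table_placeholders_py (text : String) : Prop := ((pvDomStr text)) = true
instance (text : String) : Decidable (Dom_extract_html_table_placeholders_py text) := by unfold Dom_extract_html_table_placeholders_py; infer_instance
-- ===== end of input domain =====

-- B removes A's fence/span state variables: a fenced block is consumed whole by a
-- line-oriented helper and an inline code span is skipped by one substring find,
-- so B's main loop only ever runs in "normal" mode: objective "alternative".

-- ===== PORT A =====
-- Transliteration helpers for the line-start scanning and run counting both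
-- Pythons perform verbatim (B's Python repeats the same expressions in its own
-- loops, so both ports share them).  All are exact on the inputs the loops reach.

/-- `text.find("\n", i)` with Python's `-1` replaced by `len(text)` (both Pythons
    apply that fixup; B's fence helper distinguishes "found" as `pvFindNl xs i < xs.length`). -/
def pvFindNl (xs : List Char) (i : Nat) : Nat :=
  i + ((xs.drop i).takeWhile (fun c => !(c == '\n'))).length

/-- the `while r < len(l) and l[r] == c: r += 1` run-counting loop (`_run_len` in B) -/
def pvRun (l : List Char) (c : Char) : Nat := (l.takeWhile (fun d => d == c)).length

/-- `f"@@HTML_TABLE_{k}@@"` -/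
def pvKey (k : Nat) : List Char :=
  "@@HTML_TABLE_".toList ++ PySem.Int.toChars (k : Int) ++ "@@".toList

/-- `line = text[idx:line_end]` (slice with 0 ≤ idx ≤ line_end ≤ len) -/
def lineAt (xs : List Char) (i : Nat) : List Char := (xs.drop i).take (pvFindNl xs i - i)

/-- `stripped = line.lstrip(" ")` — strips SPACES only, as both Pythons request -/
def stripAt (xs : List Char) (i : Nat) : List Char := (lineAt xs i).dropWhile (fun c => c == ' ')

/-- `stripped[0]` (read only under `stripped` nonempty) -/
def firstAt (xs : List Char) (i : Nat) : Char := (stripAt xs i).headD ' '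

/-- the fence-marker run length of the current line -/
def runAt (xs : List Char) (i : Nat) : Nat := pvRun (stripAt xs i) (firstAt xs i)

/-- A's conjunction of line-start fence-opening tests (`k` is A's `inline_delim_len`;
    B's main loop performs the same test with `k = 0` hard-wired). -/
def lineCond (xs : List Char) (k i : Nat) : Bool :=
  k == 0 && (i == 0 || xs.getD (i - 1) ' ' == '\n')
    && decide ((lineAt xs i).length - (stripAt xs i).length ≤ 3)
    && !(stripAt xs i).isEmpty
    && (firstAt xs i == '`' || firstAt xs i == '~')
    && decide (3 ≤ runAt xs i)

lemma pvFindNl_lb (xs : List Char) (i : Nat) : i ≤ pvFindNl xs i := Nat.le_add_right _ _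

lemma pvFindNl_ub (xs : List Char) (i : Nat) (hi : i ≤ xs.length) : pvFindNl xs i ≤ xs.length := by
  have h := (List.takeWhile_prefix (l := xs.drop i) (fun c => !(c == '\n'))).length_le
  simp only [List.length_drop] at h
  unfold pvFindNl; omega

lemma lineCond_lt (xs : List Char) (k i : Nat) (h : lineCond xs k i = true) :
    i < pvFindNl xs i := by
  by_contra hh
  have h0 : pvFindNl xs i - i = 0 := by omega
  have hline : lineAt xs i = [] := by simp [lineAt, h0]
  have hs : stripAt xs i = [] := by simp [stripAt, hline]
  simp [lineCond, hs] at h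

lemma headD_drop (xs : List Char) (i : Nat) (h : i < xs.length) (d : Char) :
    (xs.drop i).headD d = xs.getD i d := by
  rw [List.drop_eq_getElem_cons h]
  simp [List.getD_eq_getElem?_getD, List.getElem?_eq_getElem h]

lemma pvRun_pos (l : List Char) (c : Char) (h : l ≠ []) (hc : l.headD ' ' = c) :
    0 < pvRun l c := by
  cases l with
  | nil => exact absurd rfl h
  | cons a t =>
    simp only [List.headD_cons] at hc
    subst hc
    simp [pvRun]

lemma pvFindFrom_lb (xs pat : List Char) (k : Nat) (hk : k ≤ xs.length)
    (h : PySem.Chars.findFrom xs pat (k : Int) none ≠ -1) :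
    k ≤ (PySem.Chars.findFrom xs pat (k : Int) none).toNat := by
  have := PySem.Chars.findFrom_natCast_spec xs pat k hk h
  omega

lemma pvFindTbl_lb (xs : List Char) (i : Nat) (hi : i < xs.length)
    (h : PySem.Chars.findFrom (PySem.Chars.lower xs) "</table>".toList (i : Int) none ≠ -1) :
    i ≤ (PySem.Chars.findFrom (PySem.Chars.lower xs) "</table>".toList (i : Int) none).toNat := by
  have hk : i ≤ (PySem.Chars.lower xs).length := by
    simp only [PySem.Chars.lower, List.length_map]; omega
  exact pvFindFrom_lb _ _ i hk h

/-- literal port of A's `while idx < len(text)` loop: `out` is A's list of fragments,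
    `inF`/`fc`/`fl` the fence state (`fc = []` plays Python's `fence_char = ""`),
    `k` is `inline_delim_len`, `ph` the placeholders dict (all keys are fresh —
    the counter grows — so `dict` insertion is literally an append). -/
def loopA (xs : List Char) (idx : Nat) (inF : Bool) (fc : List Char) (fl k : Nat)
    (out : List (List Char)) (ph : List (List Char × List Char)) :
    List (List Char) × List (List Char × List Char) :=
  if hn : idx < xs.length then
    if hc : lineCond xs k idx then
      -- the fenced-line block: open / close / neither, then append the line, idx = line_end
      if !inF then
        loopA xs (pvFindNl xs idx) true [firstAt xs idx] (runAt xs idx) k (out ++ [lineAt xs idx]) ph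
      else if [firstAt xs idx] == fc && decide (fl ≤ runAt xs idx) then
        loopA xs (pvFindNl xs idx) false [] 0 k (out ++ [lineAt xs idx]) ph
      else
        loopA xs (pvFindNl xs idx) inF fc fl k (out ++ [lineAt xs idx]) ph
    else if inF then
      -- in a fence: copy one character  (text[idx] is in range: idx < len)
      loopA xs (idx + 1) inF fc fl k (out ++ [[xs.getD idx ' ']]) ph
    else if hk : k ≠ 0 then
      -- an inline code span is open: look for the closing delimiter
      if PySem.Chars.startswith (xs.drop idx) (List.replicate k '`') then
        loopA xs (idx + k) inF fc fl 0 (out ++ [List.replicate k '`']) ph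
      else
        loopA xs (idx + 1) inF fc fl k (out ++ [[xs.getD idx ' ']]) ph
    else if hb : xs.getD idx ' ' == '`' then
      -- open an inline code span of the run's length
      loopA xs (idx + pvRun (xs.drop idx) '`') inF fc fl (pvRun (xs.drop idx) '`')
        (out ++ [List.replicate (pvRun (xs.drop idx) '`') '`']) ph
    else if PySem.Chars.startswith ((PySem.Chars.lower xs).drop idx) "<table".toList then
      if he : PySem.Chars.findFrom (PySem.Chars.lower xs) "</table>".toList (idx : Int) none ≠ -1 then
        -- replace the table with a placeholder, padding with blank lines as needed
        loopA xs ((PySem.Chars.findFrom (PySem.Chars.lower xs) "</table>".toList (idx : Int) none).toNat + 8)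
          inF fc fl k
          (((if !out.isEmpty && !PySem.Chars.endswith (out.getLastD []) ['\n'] then
               out ++ [['\n', '\n']] else out)
            ++ [pvKey ph.length]) ++ [['\n', '\n']])
          (ph ++ [(pvKey ph.length,
            (xs.drop idx).take ((PySem.Chars.findFrom (PySem.Chars.lower xs) "</table>".toList (idx : Int) none).toNat + 8 - idx))])
      else
        loopA xs (idx + 1) inF fc fl k (out ++ [[xs.getD idx ' ']]) ph
    else
      loopA xs (idx + 1) inF fc fl k (out ++ [[xs.getD idx ' ']]) ph
  else (out, ph)
termination_by xs.length - idx
decreasing_by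
  · have h1 := lineCond_lt xs k idx hc; have h2 := pvFindNl_ub xs idx (by omega); omega
  · have h1 := lineCond_lt xs k idx hc; have h2 := pvFindNl_ub xs idx (by omega); omega
  · have h1 := lineCond_lt xs k idx hc; have h2 := pvFindNl_ub xs idx (by omega); omega
  · omega
  · omega
  · omega
  · have h1 : xs.drop idx ≠ [] := by
      intro h; have := congrArg List.length h; simp at this; omega
    have h2 : (xs.drop idx).headD ' ' = '`' := by
      rw [headD_drop xs idx hn]; exact eq_of_beq hb
    have := pvRun_pos (xs.drop idx) '`' h1 h2; omega
  · have := pvFindTbl_lb xs idx hn he; omega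
  · omega
  · omega

def extract_html_table_placeholders_py (text : String) : String × (List (String × String)) :=
  let r := loopA text.toList 0 false [] 0 0 [] []
  (String.ofList (PySem.Chars.join [] r.1),          -- "".join(out)
   r.2.map (fun p => (String.ofList p.1, String.ofList p.2)))

-- ===== PORT B =====
/-- B's fence-closing line test: `core and len(line)-len(core) <= 3 and core[0] == ch
    and _run_len(core, 0, ch) >= length` (the `run >= 3` / `core[0] in "`~"` parts of
    A's test are implied because B only opens a fence with `length >= 3`, `ch` in "`~"). -/
def closeLine (xs : List Char) (c : Char) (l i : Nat) : Bool :=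
  !(stripAt xs i).isEmpty
    && decide ((lineAt xs i).length - (stripAt xs i).length ≤ 3)
    && (firstAt xs i == c)
    && decide (l ≤ pvRun (stripAt xs i) c)

/-- the `while i < n` line loop of B's `_fence_block`: returns the index of the end of
    the closing marker line (before its newline), or `len(text)` if the fence never closes. -/
def bFenceScan (xs : List Char) (c : Char) (l : Nat) (i : Nat) : Nat :=
  if hn : i < xs.length then
    if closeLine xs c l i then pvFindNl xs i
    else bFenceScan xs c l (if pvFindNl xs i < xs.length then pvFindNl xs i + 1 else xs.length)
  else i
termination_by xs.length - i
decreasing_by have := pvFindNl_lb xs i; split <;> omega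

-- the port's recursion in `bMain` needs these two bounds on `bFenceScan`
lemma bFenceScan_ge (xs : List Char) (c : Char) (l : Nat) :
    ∀ (m i : Nat), xs.length ≤ i + m → i ≤ bFenceScan xs c l i := by
  intro m
  induction m with
  | zero =>
    intro i h
    rw [bFenceScan, dif_neg (show ¬ i < xs.length from by omega)]
  | succ m ih =>
    intro i h
    rw [bFenceScan]
    by_cases hn : i < xs.length
    · rw [dif_pos hn]
      split
      · exact pvFindNl_lb xs i
      · have hlb := pvFindNl_lb xs i
        by_cases hf : pvFindNl xs i < xs.length
        · rw [if_pos hf]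
          have := ih (pvFindNl xs i + 1) (by omega)
          omega
        · rw [if_neg hf]
          have := ih xs.length (by omega)
          omega
    · rw [dif_neg hn]

/-- `_fence_block`: `(text[start:e], e)` where `e` is the scan's result and the scan
    starts one past the newline at `i` (Python's `if i < n: i += 1`). -/
def bFence (xs : List Char) (c : Char) (l : Nat) (i : Nat) : List Char × Nat :=
  let e := bFenceScan xs c l (if i < xs.length then i + 1 else i)
  ((xs.drop i).take (e - i), e)

/-- literal port of B's main loop: no fence/span state — `res` is the output built
    directly, fences are handed to `bFence`, inline code spans are skipped by one
    `text.find` of the closing delimiter. -/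
def bMain (xs : List Char) (i : Nat) (res : List Char) (ph : List (List Char × List Char)) :
    List Char × List (List Char × List Char) :=
  if hn : i < xs.length then
    if hc : lineCond xs 0 i then
      -- opening fence line: hand the whole block to the helper
      bMain xs (bFence xs (firstAt xs i) (runAt xs i) (pvFindNl xs i)).2
        (res ++ lineAt xs i ++ (bFence xs (firstAt xs i) (runAt xs i) (pvFindNl xs i)).1) ph
    else if hb : xs.getD i ' ' == '`' then
      -- k = _run_len(text, i, "`"); j = text.find("`"*k, i+k)
      if hf : PySem.Chars.findFrom xs (List.replicate (pvRun (xs.drop i) '`') '`')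
          ((i + pvRun (xs.drop i) '`' : Nat) : Int) none = -1 then
        bMain xs xs.length (res ++ xs.drop i) ph      -- res += text[i:]; i = n
      else
        bMain xs ((PySem.Chars.findFrom xs (List.replicate (pvRun (xs.drop i) '`') '`')
            ((i + pvRun (xs.drop i) '`' : Nat) : Int) none).toNat + pvRun (xs.drop i) '`')
          (res ++ (xs.drop i).take ((PySem.Chars.findFrom xs (List.replicate (pvRun (xs.drop i) '`') '`')
            ((i + pvRun (xs.drop i) '`' : Nat) : Int) none).toNat + pvRun (xs.drop i) '`' - i)) ph
    else if PySem.Chars.startswith ((PySem.Chars.lower xs).drop i) "<table".toList then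
      if he : PySem.Chars.findFrom (PySem.Chars.lower xs) "</table>".toList (i : Int) none ≠ -1 then
        bMain xs ((PySem.Chars.findFrom (PySem.Chars.lower xs) "</table>".toList (i : Int) none).toNat + 8)
          (((if !res.isEmpty && !PySem.Chars.endswith res ['\n'] then res ++ ['\n', '\n'] else res)
            ++ pvKey ph.length) ++ ['\n', '\n'])
          (ph ++ [(pvKey ph.length,
            (xs.drop i).take ((PySem.Chars.findFrom (PySem.Chars.lower xs) "</table>".toList (i : Int) none).toNat + 8 - i))])
      else
        bMain xs (i + 1) (res ++ [xs.getD i ' ']) ph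
    else
      bMain xs (i + 1) (res ++ [xs.getD i ' ']) ph
  else (res, ph)
termination_by xs.length - i
decreasing_by
  · have h1 := lineCond_lt xs 0 i hc
    have harg : pvFindNl xs i ≤ (if pvFindNl xs i < xs.length then pvFindNl xs i + 1 else pvFindNl xs i) := by
      split <;> omega
    have h3 := bFenceScan_ge xs (firstAt xs i) (runAt xs i) xs.length
      (if pvFindNl xs i < xs.length then pvFindNl xs i + 1 else pvFindNl xs i)
      (by omega)
    simp only [bFence]
    omega
  · omega
  · have hr : 0 < pvRun (xs.drop i) '`' := by
      apply pvRun_pos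
      · intro h; have := congrArg List.length h; simp at this; omega
      · rw [headD_drop xs i hn]; exact eq_of_beq hb
    have hrle : pvRun (xs.drop i) '`' ≤ xs.length - i := by
      have := (List.takeWhile_prefix (l := xs.drop i) (fun d => d == '`')).length_le
      simp only [List.length_drop] at this
      exact this
    have := pvFindFrom_lb xs (List.replicate (pvRun (xs.drop i) '`') '`')
      (i + pvRun (xs.drop i) '`') (by omega) hf
    omega
  · have := pvFindTbl_lb xs i hn he; omega
  · omega
  · omega

def extract_html_table_placeholders_py_alt (text : String) : String × (List (String × String)) :=
  let r := bMain text.toList 0 [] []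
  (String.ofList r.1, r.2.map (fun p => (String.ofList p.1, String.ofList p.2)))

-- ===== PRECONDITION & SPEC =====
def Spec_extract_html_table_placeholders_py (text : String) (out : String × (List (String × String))) : Prop := out = extract_html_table_placeholders_py_alt text
instance (text : String) (out : String × (List (String × String))) : Decidable (Spec_extract_html_table_placeholders_py text out) := by unfold Spec_extract_html_table_placeholders_py; infer_instance

-- ===== CLAIM (what is proved, stated in full; the proofs are below) =====
def Claim_equal_extract_html_table_placeholders_py : Prop := ∀ (text : String), Dom_extract_html_table_placeholders_py text → Spec_extract_html_table_placeholders_py text (extract_html_table_placeholders_py text)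

-- ===== LEMMAS AND PROOFS =====

lemma bFenceScan_ub (xs : List Char) (c : Char) (l : Nat) :
    ∀ (m i : Nat), xs.length ≤ i + m → i ≤ xs.length → bFenceScan xs c l i ≤ xs.length := by
  intro m
  induction m with
  | zero =>
    intro i h hi
    rw [bFenceScan, dif_neg (show ¬ i < xs.length from by omega)]; omega
  | succ m ih =>
    intro i h hi
    rw [bFenceScan]
    by_cases hn : i < xs.length
    · rw [dif_pos hn]
      split
      · exact pvFindNl_ub xs i (by omega)
      · have hlb := pvFindNl_lb xs i
        by_cases hf : pvFindNl xs i < xs.length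
        · rw [if_pos hf]; exact ih (pvFindNl xs i + 1) (by omega) (by omega)
        · rw [if_neg hf]; exact ih xs.length (by omega) le_rfl
    · rw [dif_neg hn]; omega


lemma getD_drop_add (xs : List Char) (i t : Nat) (d : Char) :
    (xs.drop i).getD t d = xs.getD (i + t) d := by
  simp [List.getD_eq_getElem?_getD, List.getElem?_drop]

lemma takeWhile_getD (p : Char → Bool) (l : List Char) (t : Nat) (d : Char)
    (h : t < (l.takeWhile p).length) : p (l.getD t d) = true := by
  have hpre := List.takeWhile_prefix (l := l) p
  have hlt : t < l.length := lt_of_lt_of_le h hpre.length_le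
  have heq : (l.takeWhile p)[t] = l[t] := hpre.getElem h
  have hmem : (l.takeWhile p)[t] ∈ l.takeWhile p := List.getElem_mem h
  have hp := List.mem_takeWhile_imp hmem
  rw [heq] at hp
  rwa [List.getD_eq_getElem?_getD, List.getElem?_eq_getElem hlt]

lemma takeWhile_stop (P : Char → Bool) :
    ∀ (l : List Char), (l.takeWhile P).length < l.length →
      P (l.getD (l.takeWhile P).length ' ') = false := by
  intro l
  induction l with
  | nil => simp
  | cons a t ih =>
    by_cases h : P a = true
    · intro hlen
      rw [List.takeWhile_cons_of_pos h] at hlen ⊢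
      simp only [List.length_cons, Nat.add_lt_add_iff_right] at hlen
      simpa using ih hlen
    · intro _
      rw [List.takeWhile_cons_of_neg h]
      simpa using h

lemma pvFindNl_self (xs : List Char) (i : Nat) (h : pvFindNl xs i < xs.length) :
    xs.getD (pvFindNl xs i) ' ' = '\n' := by
  have hlen : ((xs.drop i).takeWhile (fun c => !(c == '\n'))).length < (xs.drop i).length := by
    simp only [List.length_drop]
    unfold pvFindNl at h
    omega
  have hst := takeWhile_stop (fun c => !(c == '\n')) (xs.drop i) hlen
  rw [getD_drop_add] at hst
  unfold pvFindNl
  simpa using hst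

lemma lineCond_false_k (xs : List Char) (k i : Nat) (hk : k ≠ 0) : lineCond xs k i = false := by
  simp [lineCond]
  intro h
  exact absurd h hk

lemma lineCond_false_mid (xs : List Char) (k i : Nat) (hi : i ≠ 0)
    (h : ¬ (xs.getD (i - 1) ' ' == '\n') = true) : lineCond xs k i = false := by
  have h' : xs[i-1]?.getD ' ' ≠ '\n' := by
    simpa [List.getD_eq_getElem?_getD] using h
  simp [lineCond, hi]
  intro _ h2
  exact absurd h2 h'

lemma lineAt_ne (xs : List Char) (k i : Nat) (h : lineCond xs k i = true) :
    lineAt xs i ≠ [] := by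
  intro hl
  have hs : stripAt xs i = [] := by simp [stripAt, hl]
  simp [lineCond, hs] at h

lemma pvFindNl_char (xs : List Char) (i p : Nat) (h1 : i ≤ p) (h2 : p < pvFindNl xs i) :
    ¬ (xs.getD p ' ' == '\n') = true := by
  have h := takeWhile_getD (fun c => !(c == '\n')) (xs.drop i) (p - i) ' '
    (by unfold pvFindNl at h2; omega)
  rw [getD_drop_add] at h
  have : i + (p - i) = p := by omega
  rw [this] at h
  simp at h
  simp [h]

lemma pvFindNl_all (xs : List Char) (i : Nat) (hi : i ≤ xs.length)
    (h : ¬ pvFindNl xs i < xs.length) : pvFindNl xs i = xs.length := by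
  have := pvFindNl_ub xs i hi
  omega

lemma pvKey_ne (k : Nat) : pvKey k ≠ [] := by
  unfold pvKey
  simp

lemma endswith_singleton (l : List Char) (c : Char) :
    PySem.Chars.endswith l [c] = (l.getLast? == some c) := by
  induction l using List.reverseRecOn with
  | nil => simp [PySem.Chars.endswith]
  | append_singleton t x _ =>
    rw [List.getLast?_concat]
    show [c].isSuffixOf (t ++ [x]) = _
    rw [Bool.eq_iff_iff]
    simp only [List.isSuffixOf_iff_suffix, List.suffix_concat_iff, beq_iff_eq,
      Option.some.injEq]
    constructor
    · rintro (h | ⟨u, h1, h2⟩)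
      · exact absurd h (by simp)
      · cases u with
        | nil => simpa using h1.symm
        | cons y v => have := congrArg List.length h1; simp at this
    · rintro rfl; exact Or.inr ⟨[], rfl, List.nil_suffix⟩

lemma pad_eq (out : List (List Char)) (hout : ∀ s ∈ out, s ≠ []) :
    (!out.isEmpty && !PySem.Chars.endswith (out.getLastD []) ['\n'])
      = (!out.flatten.isEmpty && !PySem.Chars.endswith out.flatten ['\n']) := by
  rcases List.eq_nil_or_concat out with rfl | ⟨t, s, rfl⟩
  · simp
  · simp only [List.concat_eq_append] at hout ⊢
    have hs : s ≠ [] := hout s (by simp)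
    have h1 : (t ++ [s]).getLastD [] = s := by
      rw [List.getLastD_eq_getLast?, List.getLast?_concat]; rfl
    have h2 : (t ++ [s]).flatten = t.flatten ++ s := by simp
    have e1 : (t ++ [s]).isEmpty = false := by simp
    have e2 : (t.flatten ++ s).isEmpty = false := by simp [hs]
    rw [h1, h2, e1, e2, endswith_singleton, endswith_singleton,
      List.getLast?_append_of_ne_nil _ hs]

lemma flatten_map_singleton (l : List Char) : (l.map (fun c => [c])).flatten = l := by
  induction l with
  | nil => rfl
  | cons a t ih => simp [ih]

lemma hout_append_one (out : List (List Char)) (hout : ∀ s ∈ out, s ≠ [])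
    (x : List Char) (hx : x ≠ []) : ∀ s ∈ out ++ [x], s ≠ [] := by
  intro s hs
  rcases List.mem_append.mp hs with h | h
  · exact hout s h
  · simp at h; subst h; exact hx

lemma hout_append (out elems : List (List Char)) (hout : ∀ s ∈ out, s ≠ [])
    (helems : ∀ s ∈ elems, s ≠ []) : ∀ s ∈ out ++ elems, s ≠ [] := by
  intro s hs
  rcases List.mem_append.mp hs with h | h
  · exact hout s h
  · exact helems s h

lemma slice_one (xs : List Char) (j : Nat) (h : j < xs.length) :
    [xs.getD j ' '] = (xs.drop j).take 1 := by
  rw [List.drop_eq_getElem_cons h, List.take_succ_cons, List.take_zero]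
  simp [List.getD_eq_getElem?_getD, List.getElem?_eq_getElem h]

lemma slice_cat (xs : List Char) (a b c : Nat) (h1 : a ≤ b) (h2 : b ≤ c) :
    (xs.drop a).take (b - a) ++ (xs.drop b).take (c - b) = (xs.drop a).take (c - a) := by
  have hd : (xs.drop a).drop (b - a) = xs.drop b := by
    rw [List.drop_drop]
    congr 1
    omega
  rw [show c - a = (b - a) + (c - b) from by omega, List.take_add, hd]

lemma run_take (l : List Char) (c : Char) :
    l.take (pvRun l c) = List.replicate (pvRun l c) c := by
  induction l with
  | nil => rfl
  | cons a t ih =>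
    unfold pvRun
    simp only [List.takeWhile_cons]
    by_cases h : (a == c) = true
    · rw [if_pos h]
      simp only [List.length_cons, List.take_succ_cons, List.replicate_succ]
      rw [eq_of_beq h]
      exact congrArg (c :: ·) ih
    · rw [if_neg h]
      simp

lemma prefix_drop_infix (pat l : List Char) (m : Nat) (h : pat <+: l.drop m) :
    pat <:+: l :=
  h.isInfix.trans (List.drop_suffix m l).isInfix

lemma ff_none (xs pat : List Char) (hpat : pat ≠ []) :
    PySem.Chars.findFrom xs pat ((xs.length : Nat) : Int) none = -1 := by
  rw [PySem.Chars.findFrom_natCast_eq_neg_one_iff xs pat xs.length le_rfl]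
  simp [List.drop_length, hpat]

lemma ff_here (xs pat : List Char) (p : Nat) (hp : p ≤ xs.length) (hpre : pat <+: xs.drop p) :
    PySem.Chars.findFrom xs pat (p : Int) none = (p : Int) := by
  have hne : PySem.Chars.findFrom xs pat (p : Int) none ≠ -1 := by
    rw [ne_eq, PySem.Chars.findFrom_natCast_eq_neg_one_iff xs pat p hp]
    simp only [not_not]
    exact hpre.isInfix
  obtain ⟨h1, h2, h3⟩ := PySem.Chars.findFrom_natCast_spec xs pat p hp hne
  by_contra hF
  have hgt : p < (PySem.Chars.findFrom xs pat (p : Int) none).toNat := by omega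
  exact h3 p le_rfl hgt hpre

lemma ff_step (xs pat : List Char) (p : Nat) (hp : p < xs.length) (hpre : ¬ pat <+: xs.drop p) :
    PySem.Chars.findFrom xs pat (p : Int) none
      = PySem.Chars.findFrom xs pat ((p + 1 : Nat) : Int) none := by
  have hp1 : p + 1 ≤ xs.length := hp
  by_cases h1 : PySem.Chars.findFrom xs pat ((p + 1 : Nat) : Int) none = -1
  · rw [h1, PySem.Chars.findFrom_natCast_eq_neg_one_iff xs pat p (by omega)]
    rw [PySem.Chars.findFrom_natCast_eq_neg_one_iff xs pat (p + 1) hp1] at h1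
    intro hinf
    apply h1
    obtain ⟨s, t, heq⟩ := hinf
    cases s with
    | nil =>
      exact absurd ⟨t, by simpa using heq⟩ hpre
    | cons a s' =>
      refine ⟨s', t, ?_⟩
      have htl : xs.drop (p + 1) = (xs.drop p).tail := by
        rw [List.tail_drop]
      rw [htl, ← heq]
      simp
  · obtain ⟨g1, g2, g3⟩ := PySem.Chars.findFrom_natCast_spec xs pat (p + 1) hp1 h1
    have hne : PySem.Chars.findFrom xs pat (p : Int) none ≠ -1 := by
      rw [ne_eq, PySem.Chars.findFrom_natCast_eq_neg_one_iff xs pat p (by omega)]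
      simp only [not_not]
      refine prefix_drop_infix pat (xs.drop p)
        ((PySem.Chars.findFrom xs pat ((p + 1 : Nat) : Int) none).toNat - p) ?_
      have hd : (xs.drop p).drop
          ((PySem.Chars.findFrom xs pat ((p + 1 : Nat) : Int) none).toNat - p)
          = xs.drop (PySem.Chars.findFrom xs pat ((p + 1 : Nat) : Int) none).toNat := by
        rw [List.drop_drop]
        congr 1
        omega
      rw [hd]
      exact g2
    obtain ⟨f1, f2, f3⟩ := PySem.Chars.findFrom_natCast_spec xs pat p (by omega) hne
    have hFp : (PySem.Chars.findFrom xs pat (p : Int) none).toNat ≠ p := by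
      intro h
      exact hpre (h ▸ f2)
    have e1 : ¬ (PySem.Chars.findFrom xs pat (p : Int) none).toNat
        < (PySem.Chars.findFrom xs pat ((p + 1 : Nat) : Int) none).toNat := fun h =>
      g3 _ (by omega) h f2
    have e2 : ¬ (PySem.Chars.findFrom xs pat ((p + 1 : Nat) : Int) none).toNat
        < (PySem.Chars.findFrom xs pat (p : Int) none).toNat := fun h =>
      f3 _ (by omega) h g2
    omega

lemma fence_copy (xs : List Char) (fc : List Char) (fl : Nat) :
    ∀ (m i j : Nat), j ≤ i + m → i ≤ j → j ≤ xs.length →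
    (∀ p, i ≤ p → p < j → lineCond xs 0 p = false) →
    ∀ (out : List (List Char)) (ph : List (List Char × List Char)),
    loopA xs i true fc fl 0 out ph
      = loopA xs j true fc fl 0 (out ++ ((xs.drop i).take (j - i)).map (fun c => [c])) ph := by
  intro m
  induction m with
  | zero =>
    intro i j hm hij hjn hfail out ph
    have hji : j = i := by omega
    subst hji
    simp
  | succ m ih =>
    intro i j hm hij hjn hfail out ph
    by_cases hji : j = i
    · subst hji; simp
    · have hin : i < xs.length := by omega
      have hgd : xs.getD i ' ' = xs[i] := by
        simp [List.getD_eq_getElem?_getD, List.getElem?_eq_getElem hin]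
      rw [loopA]
      rw [dif_pos hin]
      rw [dif_neg (show ¬ (lineCond xs 0 i = true) from by
        rw [hfail i le_rfl (by omega)]; simp)]
      rw [if_pos (show (true : Bool) = true from rfl)]
      rw [ih (i + 1) j (by omega) (by omega) hjn (fun p h1 h2 => hfail p (by omega) h2)]
      rw [hgd]
      rw [show (xs.drop i).take (j - i) = xs[i] :: (xs.drop (i + 1)).take (j - (i + 1)) from by
        rw [List.drop_eq_getElem_cons hin, show j - i = (j - (i + 1)) + 1 from by omega]
        rfl]
      simp

lemma lineCond_parts (xs : List Char) (i : Nat) (h : lineCond xs 0 i = true) :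
    (i = 0 ∨ xs.getD (i - 1) ' ' = '\n')
    ∧ (lineAt xs i).length - (stripAt xs i).length ≤ 3
    ∧ (stripAt xs i).isEmpty = false
    ∧ (firstAt xs i = '`' ∨ firstAt xs i = '~')
    ∧ 3 ≤ runAt xs i := by
  simp only [lineCond, Bool.and_eq_true, beq_iff_eq, Bool.or_eq_true, decide_eq_true_eq,
    Bool.not_eq_true'] at h
  obtain ⟨⟨⟨⟨⟨_, hls⟩, h3⟩, hne⟩, hfc⟩, hrun⟩ := h
  refine ⟨?_, h3, hne, ?_, hrun⟩
  · rcases hls with hls | hls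
    · left; simpa using hls
    · right; simpa [List.getD_eq_getElem?_getD] using hls
  · rcases hfc with hfc | hfc
    · left; exact hfc
    · right; exact hfc

lemma closeLine_iff (xs : List Char) (c : Char) (l i : Nat)
    (hcc : c = '`' ∨ c = '~') (hl : 3 ≤ l)
    (hls : i = 0 ∨ xs.getD (i - 1) ' ' = '\n') :
    closeLine xs c l i = (lineCond xs 0 i && (firstAt xs i == c) && decide (l ≤ runAt xs i)) := by
  have hls' : i = 0 ∨ xs[i - 1]?.getD ' ' = '\n' := by
    simpa [List.getD_eq_getElem?_getD] using hls
  rw [Bool.eq_iff_iff]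
  simp only [closeLine, lineCond, Bool.and_eq_true, Bool.not_eq_true', decide_eq_true_eq,
    beq_iff_eq, Bool.or_eq_true, beq_self_eq_true, true_and, List.getD_eq_getElem?_getD]
  constructor
  · rintro ⟨⟨⟨hne, h3⟩, hfc⟩, hlr⟩
    have hr : pvRun (stripAt xs i) c = runAt xs i := by rw [runAt, hfc]
    rw [hr] at hlr
    refine ⟨⟨⟨⟨⟨⟨?_, h3⟩, hne⟩, ?_⟩, ?_⟩, hfc⟩, hlr⟩
    · exact hls'
    · rw [hfc]; exact hcc
    · omega
  · rintro ⟨⟨⟨⟨⟨⟨_, h3⟩, hne⟩, _⟩, _⟩, hfc⟩, hlr⟩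
    have hr : pvRun (stripAt xs i) c = runAt xs i := by rw [runAt, hfc]
    rw [hr]
    exact ⟨⟨⟨hne, h3⟩, hfc⟩, hlr⟩

lemma fenceSim (xs : List Char) (c : Char) (l : Nat)
    (hcc : c = '`' ∨ c = '~') (hl : 3 ≤ l) :
    ∀ (m p : Nat), xs.length ≤ p + m → p ≤ xs.length →
    (p = xs.length ∨ p = 0 ∨ xs.getD (p - 1) ' ' = '\n') →
    ∃ elems : List (List Char),
      (∀ s ∈ elems, s ≠ []) ∧
      elems.flatten = (xs.drop p).take (bFenceScan xs c l p - p) ∧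
      ∀ out ph, loopA xs p true [c] l 0 out ph
        = loopA xs (bFenceScan xs c l p) false [] 0 0 (out ++ elems) ph := by
  intro m
  induction m with
  | zero =>
    intro p hm hp _
    have hpn : p = xs.length := by omega
    subst hpn
    refine ⟨[], by simp, ?_, ?_⟩
    · rw [bFenceScan, dif_neg (lt_irrefl _)]
      simp
    · intro out ph
      rw [bFenceScan, dif_neg (lt_irrefl _)]
      rw [loopA, dif_neg (lt_irrefl _), loopA, dif_neg (lt_irrefl _)]
      simp
  | succ m ih =>
    intro p hm hp hls
    by_cases hpn : p < xs.length
    case neg =>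
      have hpe : p = xs.length := by omega
      subst hpe
      refine ⟨[], by simp, ?_, ?_⟩
      · rw [bFenceScan, dif_neg (lt_irrefl _)]
        simp
      · intro out ph
        rw [bFenceScan, dif_neg (lt_irrefl _)]
        rw [loopA, dif_neg (lt_irrefl _), loopA, dif_neg (lt_irrefl _)]
        simp
    case pos =>
      have hls' : p = 0 ∨ xs.getD (p - 1) ' ' = '\n' := by
        rcases hls with h | h
        · omega
        · exact h
      have hclose := closeLine_iff xs c l p hcc hl hls'
      by_cases hline : lineCond xs 0 p = true
      · by_cases hmatch : ((firstAt xs p == c) && decide (l ≤ runAt xs p)) = true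
        · -- closing marker line
          have hcl : closeLine xs c l p = true := by
            rw [hclose, hline]
            simpa using hmatch
          refine ⟨[lineAt xs p], by simp [lineAt_ne xs 0 p hline], ?_, ?_⟩
          · rw [bFenceScan, dif_pos hpn, if_pos hcl]
            simp [lineAt]
          · intro out ph
            rw [bFenceScan, dif_pos hpn, if_pos hcl]
            rw [loopA, dif_pos hpn, dif_pos hline,
              if_neg (show ¬ ((!true) = true) from by simp),
              if_pos (show ([firstAt xs p] == [c] && decide (l ≤ runAt xs p)) = true from by
                simpa using hmatch)]
        · -- non-closing marker line: stays in the fence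
          have hcl : closeLine xs c l p = false := by
            rw [hclose, hline]
            simpa using hmatch
          have hj := lineCond_lt xs 0 p hline
          have hjub := pvFindNl_ub xs p (by omega)
          by_cases hjn : pvFindNl xs p < xs.length
          · have hnl := pvFindNl_self xs p hjn
            have hmid : lineCond xs 0 (pvFindNl xs p) = false := by
              apply lineCond_false_mid xs 0 (pvFindNl xs p) (by omega)
              exact pvFindNl_char xs p (pvFindNl xs p - 1) (by omega) (by omega)
            obtain ⟨elems', hne', hfl', hloop'⟩ := ih (pvFindNl xs p + 1) (by omega) (by omega)
              (Or.inr (Or.inr (by simpa using hnl)))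
            have hscan : bFenceScan xs c l p = bFenceScan xs c l (pvFindNl xs p + 1) := by
              rw [bFenceScan, dif_pos hpn, if_neg (by simp [hcl]), if_pos hjn]
            have hege : pvFindNl xs p + 1 ≤ bFenceScan xs c l (pvFindNl xs p + 1) :=
              bFenceScan_ge xs c l xs.length _ (by omega)
            refine ⟨lineAt xs p :: [xs.getD (pvFindNl xs p) ' '] :: elems', ?_, ?_, ?_⟩
            · intro s hs
              rcases List.mem_cons.mp hs with rfl | hs
              · exact lineAt_ne xs 0 p hline
              · rcases List.mem_cons.mp hs with rfl | hs
                · simp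
                · exact hne' s hs
            · have e1 : [xs.getD (pvFindNl xs p) ' ']
                  = (xs.drop (pvFindNl xs p)).take ((pvFindNl xs p + 1) - pvFindNl xs p) := by
                rw [show pvFindNl xs p + 1 - pvFindNl xs p = 1 from by omega]
                exact slice_one xs _ hjn
              simp only [List.flatten_cons]
              rw [hfl', hscan, e1]
              rw [show lineAt xs p = (xs.drop p).take (pvFindNl xs p - p) from rfl]
              rw [slice_cat xs (pvFindNl xs p) (pvFindNl xs p + 1)
                (bFenceScan xs c l (pvFindNl xs p + 1)) (by omega) (by omega)]
              rw [slice_cat xs p (pvFindNl xs p) (bFenceScan xs c l (pvFindNl xs p + 1))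
                (by omega) (by omega)]
            · intro out ph
              rw [hscan]
              rw [loopA, dif_pos hpn, dif_pos hline,
                if_neg (show ¬ ((!true) = true) from by simp),
                if_neg (show ¬ (([firstAt xs p] == [c] && decide (l ≤ runAt xs p)) = true) from by
                  simpa using hmatch)]
              rw [loopA, dif_pos hjn, dif_neg (by simp [hmid]),
                if_pos (show (true : Bool) = true from rfl)]
              rw [hloop' ((out ++ [lineAt xs p]) ++ [[xs.getD (pvFindNl xs p) ' ']]) ph]
              simp
          · have hjeq := pvFindNl_all xs p (by omega) hjn
            have hscan : bFenceScan xs c l p = xs.length := by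
              rw [bFenceScan, dif_pos hpn, if_neg (by simp [hcl]), if_neg hjn]
              rw [bFenceScan, dif_neg (lt_irrefl _)]
            refine ⟨[lineAt xs p], by simp [lineAt_ne xs 0 p hline], ?_, ?_⟩
            · rw [hscan]
              simp [lineAt, hjeq]
            · intro out ph
              rw [hscan]
              rw [loopA, dif_pos hpn, dif_pos hline,
                if_neg (show ¬ ((!true) = true) from by simp),
                if_neg (show ¬ (([firstAt xs p] == [c] && decide (l ≤ runAt xs p)) = true) from by
                  simpa using hmatch)]
              rw [hjeq]
              rw [loopA, dif_neg (lt_irrefl _), loopA, dif_neg (lt_irrefl _)]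
      · -- plain text line inside the fence: copied character by character
        have hcl : closeLine xs c l p = false := by
          rw [hclose]
          simp [hline]
        have hjlb := pvFindNl_lb xs p
        have hjub := pvFindNl_ub xs p (by omega)
        have hqlb : p < (if pvFindNl xs p < xs.length then pvFindNl xs p + 1 else xs.length) := by
          split <;> omega
        have hqub : (if pvFindNl xs p < xs.length then pvFindNl xs p + 1 else xs.length) ≤ xs.length := by
          split <;> omega
        have hfail : ∀ x, p ≤ x →
            x < (if pvFindNl xs p < xs.length then pvFindNl xs p + 1 else xs.length) →
            lineCond xs 0 x = false := by
          intro x h1 h2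
          rcases Nat.eq_or_lt_of_le h1 with rfl | h1'
          · exact eq_false_of_ne_true hline
          · apply lineCond_false_mid xs 0 x (by omega)
            apply pvFindNl_char xs p (x - 1) (by omega)
            by_cases hf : pvFindNl xs p < xs.length
            · rw [if_pos hf] at h2; omega
            · have := pvFindNl_all xs p (by omega) hf
              rw [if_neg hf] at h2
              omega
        have hlsq : (if pvFindNl xs p < xs.length then pvFindNl xs p + 1 else xs.length)
            = xs.length
            ∨ (if pvFindNl xs p < xs.length then pvFindNl xs p + 1 else xs.length) = 0
            ∨ xs.getD ((if pvFindNl xs p < xs.length then pvFindNl xs p + 1 else xs.length) - 1)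
                ' ' = '\n' := by
          by_cases hf : pvFindNl xs p < xs.length
          · rw [if_pos hf]
            right; right
            simpa using pvFindNl_self xs p hf
          · rw [if_neg hf]
            left; rfl
        obtain ⟨elems', hne', hfl', hloop'⟩ :=
          ih (if pvFindNl xs p < xs.length then pvFindNl xs p + 1 else xs.length)
            (by omega) (by omega) hlsq
        have hscan : bFenceScan xs c l p
            = bFenceScan xs c l (if pvFindNl xs p < xs.length then pvFindNl xs p + 1 else xs.length) := by
          rw [bFenceScan, dif_pos hpn, if_neg (by simp [hcl])]
        have hege := bFenceScan_ge xs c l xs.length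
          (if pvFindNl xs p < xs.length then pvFindNl xs p + 1 else xs.length) (by omega)
        refine ⟨((xs.drop p).take
            ((if pvFindNl xs p < xs.length then pvFindNl xs p + 1 else xs.length) - p)).map
            (fun c => [c]) ++ elems', ?_, ?_, ?_⟩
        · intro s hs
          rcases List.mem_append.mp hs with h | h
          · rcases List.mem_map.mp h with ⟨d, _, rfl⟩
            simp
          · exact hne' s h
        · rw [List.flatten_append, flatten_map_singleton, hfl', hscan]
          exact slice_cat xs p _ _ (by omega) (by omega)
        · intro out ph
          rw [hscan]
          rw [fence_copy xs [c] l
            (if pvFindNl xs p < xs.length then pvFindNl xs p + 1 else xs.length) p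
            (if pvFindNl xs p < xs.length then pvFindNl xs p + 1 else xs.length)
            (by omega) (by omega) hqub hfail out ph]
          rw [hloop']
          simp

lemma spanSim (xs : List Char) (fc : List Char) (fl k : Nat) (hk : k ≠ 0) :
    ∀ (m p : Nat), xs.length ≤ p + m → p ≤ xs.length →
    ∃ elems : List (List Char),
      (∀ s ∈ elems, s ≠ []) ∧
      (if PySem.Chars.findFrom xs (List.replicate k '`') (p : Int) none = -1 then
        elems.flatten = xs.drop p ∧
        ∀ out ph, loopA xs p false fc fl k out ph = (out ++ elems, ph)
      else
        elems.flatten = (xs.drop p).take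
            ((PySem.Chars.findFrom xs (List.replicate k '`') (p : Int) none).toNat + k - p) ∧
        ∀ out ph, loopA xs p false fc fl k out ph
          = loopA xs ((PySem.Chars.findFrom xs (List.replicate k '`') (p : Int) none).toNat + k)
              false fc fl 0 (out ++ elems) ph) := by
  intro m
  induction m with
  | zero =>
    intro p hm hp
    have hpn : p = xs.length := by omega
    subst hpn
    refine ⟨[], by simp, ?_⟩
    rw [if_pos (ff_none xs _ (by simp [hk]))]
    refine ⟨by simp, ?_⟩
    intro out ph
    rw [loopA, dif_neg (lt_irrefl _)]
    simp
  | succ m ih =>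
    intro p hm hp
    by_cases hpn : p < xs.length
    case neg =>
      have hpe : p = xs.length := by omega
      subst hpe
      refine ⟨[], by simp, ?_⟩
      rw [if_pos (ff_none xs _ (by simp [hk]))]
      refine ⟨by simp, ?_⟩
      intro out ph
      rw [loopA, dif_neg (lt_irrefl _)]
      simp
    case pos =>
      by_cases hs : PySem.Chars.startswith (xs.drop p) (List.replicate k '`') = true
      · -- closing delimiter found right here
        have hpre : List.replicate k '`' <+: xs.drop p := by
          have hh : (List.replicate k '`').isPrefixOf (xs.drop p) = true := hs
          exact List.isPrefixOf_iff_prefix.mp hh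
        have hF := ff_here xs (List.replicate k '`') p (by omega) hpre
        refine ⟨[List.replicate k '`'], by simp [hk], ?_⟩
        rw [hF]
        rw [if_neg (by omega)]
        constructor
        · have htake : (xs.drop p).take k = List.replicate k '`' := by
            have h := List.prefix_iff_eq_take.mp hpre
            rw [List.length_replicate] at h
            exact h.symm
          simp [htake]
        · intro out ph
          rw [loopA, dif_pos hpn, dif_neg (by simp [lineCond_false_k xs k p hk]),
            if_neg (show ¬ ((false : Bool) = true) from by simp), dif_pos hk, if_pos hs]
          simp
      · have hpre : ¬ List.replicate k '`' <+: xs.drop p := by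
          intro h
          have hh : PySem.Chars.startswith (xs.drop p) (List.replicate k '`') = true := by
            show (List.replicate k '`').isPrefixOf (xs.drop p) = true
            exact List.isPrefixOf_iff_prefix.mpr h
          exact hs hh
        have hstep := ff_step xs (List.replicate k '`') p hpn hpre
        obtain ⟨elems', hne', hrest⟩ := ih (p + 1) (by omega) (by omega)
        have hdropp : xs.drop p = xs.getD p ' ' :: xs.drop (p + 1) := by
          rw [List.drop_eq_getElem_cons hpn]
          congr 1
          simp [List.getD_eq_getElem?_getD, List.getElem?_eq_getElem hpn]
        refine ⟨[xs.getD p ' '] :: elems', ?_, ?_⟩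
        · intro s hmem
          rcases List.mem_cons.mp hmem with rfl | h
          · simp
          · exact hne' s h
        · rw [hstep]
          by_cases hc : PySem.Chars.findFrom xs (List.replicate k '`') ((p + 1 : Nat) : Int) none = -1
          · rw [if_pos hc] at hrest ⊢
            obtain ⟨hfl, hloop⟩ := hrest
            constructor
            · simp only [List.flatten_cons]
              rw [hfl, hdropp]
              rfl
            · intro out ph
              rw [loopA, dif_pos hpn, dif_neg (by simp [lineCond_false_k xs k p hk]),
                if_neg (show ¬ ((false : Bool) = true) from by simp), dif_pos hk,
                if_neg (by simpa using hs)]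
              rw [hloop (out ++ [[xs.getD p ' ']]) ph]
              simp
          · rw [if_neg hc] at hrest ⊢
            obtain ⟨hfl, hloop⟩ := hrest
            have hge : p + 1 ≤ (PySem.Chars.findFrom xs (List.replicate k '`')
                ((p + 1 : Nat) : Int) none).toNat := pvFindFrom_lb xs _ (p + 1) (by omega) hc
            constructor
            · simp only [List.flatten_cons]
              rw [hfl, hdropp]
              rw [show (PySem.Chars.findFrom xs (List.replicate k '`') ((p + 1 : Nat) : Int)
                  none).toNat + k - p
                = ((PySem.Chars.findFrom xs (List.replicate k '`') ((p + 1 : Nat) : Int)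
                  none).toNat + k - (p + 1)) + 1 from by omega]
              rw [List.take_succ_cons]
              rfl
            · intro out ph
              rw [loopA, dif_pos hpn, dif_neg (by simp [lineCond_false_k xs k p hk]),
                if_neg (show ¬ ((false : Bool) = true) from by simp), dif_pos hk,
                if_neg (by simpa using hs)]
              rw [hloop (out ++ [[xs.getD p ' ']]) ph]
              simp

lemma mainSim (xs : List Char) :
    ∀ (m i : Nat), xs.length ≤ i + m → i ≤ xs.length →
    ∀ (fc : List Char) (fl : Nat) (out : List (List Char)) (ph : List (List Char × List Char)),
    (∀ s ∈ out, s ≠ []) →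
    ((loopA xs i false fc fl 0 out ph).1.flatten, (loopA xs i false fc fl 0 out ph).2)
      = bMain xs i out.flatten ph := by
  intro m
  induction m with
  | zero =>
    intro i hm hi fc fl out ph hout
    rw [loopA, bMain, dif_neg (show ¬ i < xs.length from by omega),
      dif_neg (show ¬ i < xs.length from by omega)]
  | succ m ih =>
    intro i hm hi fc fl out ph hout
    by_cases hn : i < xs.length
    case neg =>
      rw [loopA, bMain, dif_neg hn, dif_neg hn]
    case pos =>
      by_cases hline : lineCond xs 0 i = true
      · -- opening fence line
        obtain ⟨_, _, _, hcc, hrun⟩ := lineCond_parts xs i hline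
        have hj := lineCond_lt xs 0 i hline
        have hjub := pvFindNl_ub xs i (by omega)
        rw [loopA, dif_pos hn, dif_pos hline, if_pos (show (!false) = true from rfl)]
        rw [bMain, dif_pos hn, dif_pos hline]
        by_cases hjn : pvFindNl xs i < xs.length
        · have hnl := pvFindNl_self xs i hjn
          have hmid : lineCond xs 0 (pvFindNl xs i) = false := by
            apply lineCond_false_mid xs 0 (pvFindNl xs i) (by omega)
            exact pvFindNl_char xs i (pvFindNl xs i - 1) (by omega) (by omega)
          obtain ⟨elems, hne, hfl, hloop⟩ := fenceSim xs (firstAt xs i) (runAt xs i) hcc hrun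
            xs.length (pvFindNl xs i + 1) (by omega) (by omega)
            (Or.inr (Or.inr (by simpa using hnl)))
          have hbf : bFence xs (firstAt xs i) (runAt xs i) (pvFindNl xs i)
              = ((xs.drop (pvFindNl xs i)).take
                  (bFenceScan xs (firstAt xs i) (runAt xs i) (pvFindNl xs i + 1) - pvFindNl xs i),
                 bFenceScan xs (firstAt xs i) (runAt xs i) (pvFindNl xs i + 1)) := by
            rw [bFence, if_pos hjn]
          have hege : pvFindNl xs i + 1
              ≤ bFenceScan xs (firstAt xs i) (runAt xs i) (pvFindNl xs i + 1) :=
            bFenceScan_ge xs _ _ xs.length _ (by omega)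
          have heub : bFenceScan xs (firstAt xs i) (runAt xs i) (pvFindNl xs i + 1) ≤ xs.length :=
            bFenceScan_ub xs _ _ xs.length _ (by omega) (by omega)
          rw [loopA, dif_pos hjn, dif_neg (by simp [hmid]),
            if_pos (show (true : Bool) = true from rfl)]
          rw [hloop ((out ++ [lineAt xs i]) ++ [[xs.getD (pvFindNl xs i) ' ']]) ph]
          rw [ih (bFenceScan xs (firstAt xs i) (runAt xs i) (pvFindNl xs i + 1)) (by omega)
            (by omega) [] 0
            (((out ++ [lineAt xs i]) ++ [[xs.getD (pvFindNl xs i) ' ']]) ++ elems) ph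
            (hout_append _ _ (hout_append_one _ (hout_append_one _ hout _
              (lineAt_ne xs 0 i hline)) _ (by simp)) hne)]
          rw [hbf]
          have e1 : [xs.getD (pvFindNl xs i) ' ']
              = (xs.drop (pvFindNl xs i)).take ((pvFindNl xs i + 1) - pvFindNl xs i) := by
            rw [show pvFindNl xs i + 1 - pvFindNl xs i = 1 from by omega]
            exact slice_one xs _ hjn
          congr 1
          simp only [List.flatten_append, List.flatten_cons, List.flatten_nil, List.append_nil]
          rw [hfl, e1, List.append_assoc]
          congr 1
          exact slice_cat xs (pvFindNl xs i) (pvFindNl xs i + 1)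
            (bFenceScan xs (firstAt xs i) (runAt xs i) (pvFindNl xs i + 1)) (by omega) (by omega)
        · have hjeq := pvFindNl_all xs i (by omega) hjn
          have hbf : bFence xs (firstAt xs i) (runAt xs i) xs.length
              = ([], xs.length) := by
            rw [bFence, if_neg (lt_irrefl _), bFenceScan, dif_neg (lt_irrefl _)]
            simp
          rw [hjeq]
          rw [loopA, dif_neg (lt_irrefl _)]
          rw [hbf]
          rw [bMain, dif_neg (lt_irrefl _)]
          simp
      · rw [loopA, dif_pos hn, dif_neg (by simp [hline]),
          if_neg (show ¬ ((false : Bool) = true) from by simp),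
          dif_neg (show ¬ ((0 : Nat) ≠ 0) from by omega)]
        rw [bMain, dif_pos hn,
          dif_neg (show ¬ (lineCond xs 0 i = true) from by simp [hline])]
        by_cases hb : (xs.getD i ' ' == '`') = true
        · -- backtick run: open a span and skip to its closing delimiter
          rw [dif_pos hb, dif_pos hb]
          have hr : 0 < pvRun (xs.drop i) '`' := by
            apply pvRun_pos
            · intro h; have := congrArg List.length h; simp at this; omega
            · rw [headD_drop xs i hn]; exact eq_of_beq hb
          have hrle : pvRun (xs.drop i) '`' ≤ xs.length - i := by
            have := (List.takeWhile_prefix (l := xs.drop i) (fun d => d == '`')).length_le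
            simp only [List.length_drop] at this
            exact this
          obtain ⟨elems, hne, hbody⟩ := spanSim xs fc fl (pvRun (xs.drop i) '`') (by omega)
            xs.length (i + pvRun (xs.drop i) '`') (by omega) (by omega)
          have htake : (xs.drop i).take (pvRun (xs.drop i) '`')
              = List.replicate (pvRun (xs.drop i) '`') '`' := run_take (xs.drop i) '`'
          have hdd : (xs.drop i).drop (pvRun (xs.drop i) '`') = xs.drop (i + pvRun (xs.drop i) '`') := by
            rw [List.drop_drop]
          by_cases hf : PySem.Chars.findFrom xs (List.replicate (pvRun (xs.drop i) '`') '`')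
              ((i + pvRun (xs.drop i) '`' : Nat) : Int) none = -1
          · rw [if_pos hf] at hbody
            rw [dif_pos hf]
            obtain ⟨hfl, hloop⟩ := hbody
            rw [hloop (out ++ [List.replicate (pvRun (xs.drop i) '`') '`']) ph]
            rw [bMain, dif_neg (lt_irrefl _)]
            congr 1
            simp only [List.flatten_append, List.flatten_cons, List.flatten_nil, List.append_nil]
            rw [hfl, ← htake, List.append_assoc]
            congr 1
            rw [← hdd]
            exact List.take_append_drop _ _
          · rw [if_neg hf] at hbody
            rw [dif_neg hf]
            obtain ⟨hfl, hloop⟩ := hbody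
            have hge : i + pvRun (xs.drop i) '`'
                ≤ (PySem.Chars.findFrom xs (List.replicate (pvRun (xs.drop i) '`') '`')
                  ((i + pvRun (xs.drop i) '`' : Nat) : Int) none).toNat :=
              pvFindFrom_lb xs _ _ (by omega) hf
            have hub : (PySem.Chars.findFrom xs (List.replicate (pvRun (xs.drop i) '`') '`')
                ((i + pvRun (xs.drop i) '`' : Nat) : Int) none).toNat
                + pvRun (xs.drop i) '`' ≤ xs.length := by
              obtain ⟨_, g2, _⟩ := PySem.Chars.findFrom_natCast_spec xs
                (List.replicate (pvRun (xs.drop i) '`') '`') (i + pvRun (xs.drop i) '`')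
                (by omega) hf
              have := g2.length_le
              simp only [List.length_replicate, List.length_drop] at this
              omega
            set F := (PySem.Chars.findFrom xs (List.replicate (pvRun (xs.drop i) '`') '`')
                ((i + pvRun (xs.drop i) '`' : Nat) : Int) none).toNat with hFdef
            rw [hloop (out ++ [List.replicate (pvRun (xs.drop i) '`') '`']) ph]
            rw [ih (F + pvRun (xs.drop i) '`')
              (by omega) (by omega) fc fl
              ((out ++ [List.replicate (pvRun (xs.drop i) '`') '`']) ++ elems) ph
              (hout_append _ _ (hout_append_one _ hout _ (by
                simp only [ne_eq, List.replicate_eq_nil_iff]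
                omega)) hne)]
            congr 1
            simp only [List.flatten_append, List.flatten_cons, List.flatten_nil, List.append_nil]
            rw [hfl, ← htake, List.append_assoc]
            congr 1
            rw [show (xs.drop i).take (pvRun (xs.drop i) '`')
                = (xs.drop i).take ((i + pvRun (xs.drop i) '`') - i) from by
              rw [Nat.add_sub_cancel_left]]
            rw [slice_cat xs i (i + pvRun (xs.drop i) '`') (F + pvRun (xs.drop i) '`')
              (by omega) (by omega)]
        · rw [dif_neg hb, dif_neg hb]
          by_cases ht : PySem.Chars.startswith ((PySem.Chars.lower xs).drop i) "<table".toList = true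
          · rw [if_pos ht, if_pos ht]
            by_cases he : PySem.Chars.findFrom (PySem.Chars.lower xs) "</table>".toList (i : Int) none ≠ -1
            · rw [dif_pos he, dif_pos he]
              have hge := pvFindTbl_lb xs i hn he
              have hub : (PySem.Chars.findFrom (PySem.Chars.lower xs) "</table>".toList
                  (i : Int) none).toNat + 8 ≤ xs.length := by
                have hk : i ≤ (PySem.Chars.lower xs).length := by
                  simp only [PySem.Chars.lower, List.length_map]; omega
                obtain ⟨_, g2, _⟩ := PySem.Chars.findFrom_natCast_spec (PySem.Chars.lower xs)
                  "</table>".toList i hk he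
                have hlen := g2.length_le
                rw [List.length_drop] at hlen
                have h8 : ("</table>".toList).length = 8 := by decide
                have hll : (PySem.Chars.lower xs).length = xs.length := by
                  simp [PySem.Chars.lower]
                omega
              rw [ih ((PySem.Chars.findFrom (PySem.Chars.lower xs) "</table>".toList
                  (i : Int) none).toNat + 8) (by omega) (by omega) fc fl _ _ ?houtT]
              case houtT =>
                intro s hs
                rcases List.mem_append.mp hs with h1 | h1
                · rcases List.mem_append.mp h1 with h2 | h2
                  · split at h2
                    · rcases List.mem_append.mp h2 with h3 | h3
                      · exact hout s h3
                      · simp at h3; subst h3; simp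
                    · exact hout s h2
                  · simp at h2; subst h2; exact pvKey_ne _
                · simp at h1; subst h1; simp
              congr 1
              rw [pad_eq out hout]
              split <;> simp
            · rw [dif_neg he, dif_neg he]
              rw [ih (i + 1) (by omega) (by omega) fc fl (out ++ [[xs.getD i ' ']]) ph
                (hout_append_one out hout _ (by simp))]
              congr 1
              simp
          · rw [if_neg ht, if_neg ht]
            rw [ih (i + 1) (by omega) (by omega) fc fl (out ++ [[xs.getD i ' ']]) ph
              (hout_append_one out hout _ (by simp))]
            congr 1
            simp

-- ===== VERDICT (by name: the statement is the Claim_ definition above) =====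
theorem extract_html_table_placeholders_py_spec : Claim_equal_extract_html_table_placeholders_py := by
  intro text _hdom
  unfold Spec_extract_html_table_placeholders_py
  unfold extract_html_table_placeholders_py extract_html_table_placeholders_py_alt
  have h := mainSim text.toList text.toList.length 0 (by omega) (by omega) [] 0 [] []
    (by simp)
  have hjoin : ∀ l : List (List Char), PySem.Chars.join [] l = l.flatten := by
    intro l
    induction l with
    | nil => rfl
    | cons a t ih =>
      cases t with
      | nil => simp [PySem.Chars.join, List.intercalate]
      | cons b u =>
        simp only [PySem.Chars.join, List.intercalate] at *
        rw [List.intersperse_cons₂]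
        simp_all
  simp only [hjoin]
  have h1 := congrArg Prod.fst h
  have h2 := congrArg Prod.snd h
  simp only at h1 h2
  simp [h1, h2]
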